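-- pv_equiv track=rewrite | github.com/RasmusKRiis/nf-core-sars | bin/primer_metrics.py | find_best_alignment
-- ===== SOURCE A (Python) =====
-- from typing import Dict, List, Tuple
--
-- AMBIGUITY_CODES = {
--     "A": {"A"},
--     "C": {"C"},
--     "G": {"G"},
--     "T": {"T"},
--     "U": {"T"},
--     "R": {"A", "G"},
--     "Y": {"C", "T"},
--     "S": {"G", "C"},
--     "W": {"A", "T"},
--     "K": {"G", "T"},
--     "M": {"A", "C"},
--     "B": {"C", "G", "T"},
--     "D": {"A", "G", "T"},
--     "H": {"A", "C", "T"},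
--     "V": {"A", "C", "G"},
--     "N": {"A", "C", "G", "T"},
-- }
--
-- def bases_match(primer_base: str, template_base: str) -> bool:
--     """
--     Compare primer and template bases with IUPAC support.
--     Unknown template bases should be penalized: treating template N as a match can
--     produce false "perfect" hits in low-quality/ambiguous regions.
--     """
--     t_base = template_base.upper()
--     if t_base == "N" or t_base == "-":
--         return False
--     p_set = AMBIGUITY_CODES.get(primer_base.upper(), {primer_base.upper()})
--     t_set = AMBIGUITY_CODES.get(t_base, {t_base})
--     return bool(p_set & t_set)
--
-- def mismatch_metrics(primer_seq: str, template_seq: str) -> Tuple[int, List[int]]: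
--     mismatches = []
--     for idx, (a, b) in enumerate(zip(primer_seq, template_seq), start=1):
--         if not bases_match(a, b):
--             mismatches.append(idx)
--     if len(template_seq) < len(primer_seq):
--         span = range(len(template_seq) + 1, len(primer_seq) + 1)
--         mismatches.extend(span)
--     return len(mismatches), mismatches
--
-- def find_best_alignment(primer_seq: str, window_seq: str) -> Tuple[int, List[int], int, str]:
--     """Slide the primer across the window and return the alignment with the fewest mismatches."""
--     primer_len = len(primer_seq)
--     if primer_len == 0:
--         return 0, [], 0, ""
--     if len(window_seq) < primer_len:
--         window_seq = window_seq + ("N" * (primer_len - len(window_seq)))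
--     max_offset = len(window_seq) - primer_len
--     best = (primer_len + 1, [], 0, window_seq[:primer_len])
--     for offset in range(max_offset + 1):
--         candidate = window_seq[offset : offset + primer_len]
--         mismatch_count, mismatch_positions = mismatch_metrics(primer_seq, candidate)
--         if mismatch_count < best[0]:
--             best = (mismatch_count, mismatch_positions, offset, candidate)
--             if mismatch_count == 0:
--                 break
--     return best
-- ===== SOURCE B (Python) =====
-- from typing import Dict, List, Tuple
--
-- AMBIGUITY_CODES = {
--     "A": {"A"},
--     "C": {"C"},
--     "G": {"G"},
--     "T": {"T"},
--     "U": {"T"},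
--     "R": {"A", "G"},
--     "Y": {"C", "T"},
--     "S": {"G", "C"},
--     "W": {"A", "T"},
--     "K": {"G", "T"},
--     "M": {"A", "C"},
--     "B": {"C", "G", "T"},
--     "D": {"A", "G", "T"},
--     "H": {"A", "C", "T"},
--     "V": {"A", "C", "G"},
--     "N": {"A", "C", "G", "T"},
-- }
--
--
-- def bases_match(primer_base, template_base):
--     t_base = template_base.upper()
--     if t_base == "N" or t_base == "-":
--         return False
--     p_set = AMBIGUITY_CODES.get(primer_base.upper(), {primer_base.upper()})
--     t_set = AMBIGUITY_CODES.get(t_base, {t_base})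
--     return bool(p_set & t_set)
--
--
-- def find_best_alignment(primer_seq, window_seq):
--     """Cross-correlation scatter: list every offset at which some primer base matches
--     the window base under it, tally the hits in a counter keyed by offset, take the
--     offset with the most matches (first on ties = fewest mismatches), and
--     materialise mismatch positions and the candidate slice only for that offset."""
--     n = len(primer_seq)
--     if n == 0:
--         return 0, [], 0, ""
--     if len(window_seq) < n:
--         window_seq = window_seq + "N" * (n - len(window_seq))
--     num_offsets = len(window_seq) - n + 1
--     hits = [off
--             for j, p in enumerate(primer_seq)
--             for off in range(num_offsets)
--             if bases_match(p, window_seq[off + j])]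
--     matches = {}
--     for off in hits:
--         matches[off] = matches.get(off, 0) + 1
--     best_off, best = 0, matches.get(0, 0)
--     for off in range(1, num_offsets):
--         m = matches.get(off, 0)
--         if m > best:
--             best_off, best = off, m
--     positions = [j + 1 for j in range(n)
--                  if not bases_match(primer_seq[j], window_seq[best_off + j])]
--     return n - best, positions, best_off, window_seq[best_off:best_off + n]
-- ===== Notes on version B (the rewrite author's own statement) =====
-- stated objective: alternative
-- what changed: A slides the primer offset by offset, slicing a candidate and rebuilding the full mismatch-position list at every offset while tracking the best tuple with an early break; B never slides or slices inside the loop: it scatters every (primer position, window position) match into a flat hit list of offsets, tallies the hits in a dict counter keyed by offset (a cross-correlation of match indicators), takes the first offset of maximal match count by a separate argmax scan, and materialises the mismatch positions and the candidate slice once, for that offset only.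
import Mathlib
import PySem

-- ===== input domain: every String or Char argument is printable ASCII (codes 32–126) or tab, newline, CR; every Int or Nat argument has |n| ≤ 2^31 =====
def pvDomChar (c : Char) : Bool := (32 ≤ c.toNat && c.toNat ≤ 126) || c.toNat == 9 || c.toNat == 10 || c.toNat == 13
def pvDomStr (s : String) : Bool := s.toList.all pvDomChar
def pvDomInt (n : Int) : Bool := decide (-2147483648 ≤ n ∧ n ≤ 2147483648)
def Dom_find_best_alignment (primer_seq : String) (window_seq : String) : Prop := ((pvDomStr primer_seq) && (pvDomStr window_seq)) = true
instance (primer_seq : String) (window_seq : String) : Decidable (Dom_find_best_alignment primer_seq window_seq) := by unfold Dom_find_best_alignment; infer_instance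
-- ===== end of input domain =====

-- B replaces A's offset-by-offset slide (slice a candidate, rebuild the mismatch list, track the
-- best tuple with an early break) by a cross-correlation scatter: every matching (primer pos,
-- window pos) pair drops its offset into a flat hit list, a dict counter tallies the hits per
-- offset, a separate argmax scan picks the first offset of maximal match count, and positions and
-- the candidate slice are materialised once (objective: alternative; same asymptotic cost).

-- ===== PORT A =====
-- the module constant AMBIGUITY_CODES (keys/values are 1-char strings, modelled as Char)
def pvCodes : PySem.Dict Char (PySem.Set Char) := PySem.Dict.ofList
  [('A', PySem.Set.ofList ['A']), ('C', PySem.Set.ofList ['C']), ('G', PySem.Set.ofList ['G']),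
   ('T', PySem.Set.ofList ['T']), ('U', PySem.Set.ofList ['T']), ('R', PySem.Set.ofList ['A','G']),
   ('Y', PySem.Set.ofList ['C','T']), ('S', PySem.Set.ofList ['G','C']), ('W', PySem.Set.ofList ['A','T']),
   ('K', PySem.Set.ofList ['G','T']), ('M', PySem.Set.ofList ['A','C']), ('B', PySem.Set.ofList ['C','G','T']),
   ('D', PySem.Set.ofList ['A','G','T']), ('H', PySem.Set.ofList ['A','C','T']),
   ('V', PySem.Set.ofList ['A','C','G']), ('N', PySem.Set.ofList ['A','C','G','T'])]

-- helper bases_match (shared by both Python files)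
def pvBasesMatch (primer_base template_base : Char) : Bool :=
  let t_base := PySem.Chars.upperChar template_base
  if t_base == 'N' || t_base == '-' then false
  else
    let p_set := PySem.Dict.getD pvCodes (PySem.Chars.upperChar primer_base) (PySem.Set.ofList [PySem.Chars.upperChar primer_base])
    let t_set := PySem.Dict.getD pvCodes t_base (PySem.Set.ofList [t_base])
    !(PySem.Set.inter p_set t_set).isEmpty

def pvMetrics (primer template : List Char) : Int × List Int :=
  let ms0 := (PySem.List.enumerate (primer.zip template) 1).foldl
      (fun acc p => if pvBasesMatch p.2.1 p.2.2 then acc else acc ++ [p.1]) []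
  -- Python rebinds 'mismatches'; ported with a second binder name
  let ms := if (template.length : Int) < (primer.length : Int) then
      ms0 ++ PySem.List.pyRange ((template.length : Int) + 1) ((primer.length : Int) + 1) 1
    else ms0
  ((ms.length : Int), ms)

def pvLoopA (primer w : List Char) (P : Int) : List Int → Int × List Int × Int × String → Int × List Int × Int × String
  | [], best => best
  | off :: rest, best =>
    let candidate := PySem.List.slice w (some off) (some (off + P))
    let m := pvMetrics primer candidate
    if m.1 < best.1 then
      if m.1 == 0 then (m.1, m.2, off, String.ofList candidate)
      else pvLoopA primer w P rest (m.1, m.2, off, String.ofList candidate)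
    else pvLoopA primer w P rest best

def find_best_alignment (primer_seq : String) (window_seq : String) : Int × List Int × Int × String :=
  let primer := primer_seq.toList
  let primer_len : Int := primer.length
  if primer_len == 0 then (0, [], 0, "")
  else
    let w0 := window_seq.toList
    let w := if (w0.length : Int) < primer_len then w0 ++ PySem.List.pyRepeat ['N'] (primer_len - (w0.length : Int)) else w0
    let max_offset : Int := (w.length : Int) - primer_len
    pvLoopA primer w primer_len (PySem.List.pyRange 0 (max_offset + 1) 1)
      (primer_len + 1, [], 0, String.ofList (PySem.List.slice w none (some primer_len)))

-- ===== PORT B =====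
-- B: hit list (comprehension → flatMap of filters; string indices always in range where used),
-- dict counter, argmax scan, one materialisation of positions and slice.
def find_best_alignment_alt (primer_seq : String) (window_seq : String) : Int × List Int × Int × String :=
  let primer := primer_seq.toList
  let n : Int := primer.length
  if n == 0 then (0, [], 0, "")
  else
    let w0 := window_seq.toList
    let w := if (w0.length : Int) < n then w0 ++ PySem.List.pyRepeat ['N'] (n - (w0.length : Int)) else w0
    let num : Int := (w.length : Int) - n + 1
    let hits := (PySem.List.enumerate primer 0).flatMap (fun q =>
        (PySem.List.pyRange 0 num 1).filter (fun off => pvBasesMatch q.2 (PySem.List.pyGetD w (off + q.1) ' ')))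
    let tally := hits.foldl (fun d off => PySem.Dict.insert d off (PySem.Dict.getD d off 0 + 1)) (PySem.Dict.empty : PySem.Dict Int Int)
    let st := (PySem.List.pyRange 1 num 1).foldl (fun (st : Int × Int) off =>
        let m := PySem.Dict.getD tally off 0
        if st.2 < m then (off, m) else st) ((0 : Int), PySem.Dict.getD tally 0 0)
    let best_off := st.1
    let best := st.2
    let positions := ((PySem.List.pyRange 0 n 1).filter (fun j =>
        !pvBasesMatch (PySem.List.pyGetD primer j ' ') (PySem.List.pyGetD w (best_off + j) ' '))).map (fun j => j + 1)
    (n - best, positions, best_off, String.ofList (PySem.List.slice w (some best_off) (some (best_off + n))))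

-- ===== PRECONDITION & SPEC =====
def Spec_find_best_alignment (primer_seq : String) (window_seq : String) (out : Int × List Int × Int × String) : Prop := out = find_best_alignment_alt primer_seq window_seq
instance (primer_seq : String) (window_seq : String) (out : Int × List Int × Int × String) : Decidable (Spec_find_best_alignment primer_seq window_seq out) := by unfold Spec_find_best_alignment; infer_instance

-- ===== CLAIM (what is proved, stated in full; the proofs are below) =====
def Claim_equal_find_best_alignment : Prop := ∀ (primer_seq : String) (window_seq : String), Dom_find_best_alignment primer_seq window_seq → Spec_find_best_alignment primer_seq window_seq (find_best_alignment primer_seq window_seq)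

-- ===== LEMMAS AND PROOFS =====

-- per-position mismatch predicate and the canonical result at an offset
def pvMisJ (p w : List Char) (off : Int) (j : Nat) : Bool :=
  !pvBasesMatch (p.getD j 'A') (w.getD (off.toNat + j) 'A')

def pvPosB (p w : List Char) (off : Int) : List Int :=
  ((List.range p.length).filter (pvMisJ p w off)).map (fun (j : Nat) => ((j : Int) + 1))

def pvC (p w : List Char) (off : Int) : Int :=
  (((List.range p.length).filter (pvMisJ p w off)).length : Int)

def pvMC (p w : List Char) (off : Int) : Int :=
  (((List.range p.length).filter (fun j => pvBasesMatch (p.getD j 'A') (w.getD (off.toNat + j) 'A'))).length : Int)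

def pvRes (p w : List Char) (off : Int) : Int × List Int × Int × String :=
  (pvC p w off, pvPosB p w off, off,
   String.ofList (PySem.List.slice w (some off) (some (off + (p.length : Int)))))

def pvPick (c : Int → Int) (m : Int) (l : List Int) : Int :=
  l.foldl (fun cur y => if c y < c cur then y else cur) m

lemma pvC_nonneg (p w : List Char) (off : Int) : 0 ≤ pvC p w off := Int.natCast_nonneg _

lemma pvC_le (p w : List Char) (off : Int) : pvC p w off ≤ (p.length : Int) := by
  unfold pvC
  exact_mod_cast le_trans (List.length_filter_le _ _) (le_of_eq (List.length_range))

lemma pvC_add_pvMC (p w : List Char) (off : Int) :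
    pvC p w off + pvMC p w off = (p.length : Int) := by
  have key : ∀ (l : List Nat) (c : Nat → Bool),
      (l.filter (fun x => !c x)).length + (l.filter c).length = l.length := by
    intro l c
    induction l with
    | nil => rfl
    | cons a t ih => by_cases h : c a <;> simp [h] <;> omega
  have h := key (List.range p.length)
      (fun j => pvBasesMatch (p.getD j 'A') (w.getD (off.toNat + j) 'A'))
  simp only [List.length_range] at h
  simp only [pvC, pvMC]
  rw [show pvMisJ p w off = (fun j => !pvBasesMatch (p.getD j 'A') (w.getD (off.toNat + j) 'A')) from rfl]
  omega

lemma pvFold_core (p t : List Char) (s : Int) (acc : List Int) (hlen : t.length = p.length) :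
    (PySem.List.enumerate (p.zip t) s).foldl
        (fun acc q => if pvBasesMatch q.2.1 q.2.2 then acc else acc ++ [q.1]) acc
      = acc ++ ((List.range p.length).filter
          (fun j => !pvBasesMatch (p.getD j 'A') (t.getD j 'A'))).map (fun (j : Nat) => ((j : Int) + s)) := by
  induction p generalizing t s acc with
  | nil =>
    cases t with
    | nil => simp
    | cons b t => simp at hlen
  | cons a p ih =>
    cases t with
    | nil => simp at hlen
    | cons b t =>
      have hlen' : t.length = p.length := by simpa using hlen
      have hpred : (List.range p.length).filter
          ((fun j => !pvBasesMatch ((a :: p).getD j 'A') ((b :: t).getD j 'A')) ∘ Nat.succ)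
          = (List.range p.length).filter (fun j => !pvBasesMatch (p.getD j 'A') (t.getD j 'A')) := by
        apply List.filter_congr
        intro x hx
        simp
      have hmap : ∀ (F : List Nat),
          F.map ((fun (j : Nat) => (j : Int) + s) ∘ Nat.succ) = F.map (fun (j : Nat) => (j : Int) + (s + 1)) := by
        intro F
        apply List.map_congr_left
        intro x hx
        simp [Function.comp]
        ring
      simp only [List.zip_cons_cons, PySem.List.enumerate_cons, List.foldl_cons,
        List.length_cons, List.range_succ_eq_map, List.filter_cons, List.getD_cons_zero]
      by_cases hm : pvBasesMatch a b
      · simp only [hm, if_true, Bool.not_true, Bool.false_eq_true, if_false]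
        rw [ih t (s + 1) acc hlen']
        congr 1
        rw [List.filter_map, List.map_map, hpred, hmap]
      · simp only [hm, Bool.false_eq_true, if_false, Bool.not_false, if_true]
        rw [ih t (s + 1) (acc ++ [s]) hlen', List.append_assoc]
        congr 1
        rw [List.filter_map, List.map_cons, List.map_map, hpred, hmap]
        simp

lemma pvMetrics_eq (primer w : List Char) (off : Nat) (hoff : off + primer.length ≤ w.length) :
    pvMetrics primer (PySem.List.slice w (some (off : Int)) (some ((off : Int) + (primer.length : Int))))
      = (pvC primer w (off : Int), pvPosB primer w (off : Int)) := by
  have hcand : PySem.List.slice w (some (off : Int)) (some ((off : Int) + (primer.length : Int)))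
      = (w.drop off).take primer.length := by
    rw [PySem.List.slice_toNat w (by positivity) (by positivity)]
    congr 1
    omega
  have hclen : ((w.drop off).take primer.length).length = primer.length := by
    rw [List.length_take, List.length_drop]
    omega
  have hfilter : (List.range primer.length).filter
        (fun j => !pvBasesMatch (primer.getD j 'A') (((w.drop off).take primer.length).getD j 'A'))
      = (List.range primer.length).filter (pvMisJ primer w (off : Int)) := by
    apply List.filter_congr
    intro j hj
    rw [List.mem_range] at hj
    have hojw : off + j < w.length := by omega
    have hg : ((w.drop off).take primer.length).getD j 'A' = w.getD (off + j) 'A' := by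
      rw [List.getD_eq_getElem _ 'A' (by rw [hclen]; exact hj), List.getD_eq_getElem w 'A' hojw]
      rw [List.getElem_take, List.getElem_drop]
    rw [hg]
    simp [pvMisJ]
  simp only [pvMetrics]
  rw [hcand, hclen, if_neg (lt_irrefl ((primer.length : Int)))]
  rw [pvFold_core primer ((w.drop off).take primer.length) 1 [] hclen, List.nil_append, hfilter]
  simp [pvC, pvPosB]

lemma pvMetrics_eq' (primer w : List Char) (off : Int) (h0 : 0 ≤ off)
    (hoff : off + (primer.length : Int) ≤ (w.length : Int)) :
    pvMetrics primer (PySem.List.slice w (some off) (some (off + (primer.length : Int))))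
      = (pvC primer w off, pvPosB primer w off) := by
  lift off to ℕ using h0 with noff
  exact pvMetrics_eq primer w noff (by omega)

lemma pvPick_cons (c : Int → Int) (m y : Int) (l : List Int) :
    pvPick c m (y :: l) = pvPick c (if c y < c m then y else m) l := rfl

lemma pvPick_stall (c : Int → Int) (m : Int) (l : List Int)
    (h : ∀ y ∈ l, ¬ c y < c m) : pvPick c m l = m := by
  induction l with
  | nil => rfl
  | cons y rest ih =>
    rw [pvPick_cons, if_neg (h y (by simp))]
    exact ih (fun z hz => h z (by simp [hz]))

lemma pvPick_mem (c : Int → Int) (m : Int) (l : List Int) :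
    pvPick c m l ∈ m :: l := by
  induction l generalizing m with
  | nil => simp [pvPick]
  | cons y rest ih =>
    rw [pvPick_cons]
    have := ih (if c y < c m then y else m)
    rcases List.mem_cons.mp this with h | h
    · rw [h]; split_ifs <;> simp
    · simp [h]

lemma pvLoopA_cons (primer w : List Char) (P off : Int) (rest : List Int) (best : Int × List Int × Int × String) :
    pvLoopA primer w P (off :: rest) best =
      (let candidate := PySem.List.slice w (some off) (some (off + P));
       let m := pvMetrics primer candidate;
       if m.1 < best.1 then
         if m.1 == 0 then (m.1, m.2, off, String.ofList candidate)
         else pvLoopA primer w P rest (m.1, m.2, off, String.ofList candidate)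
       else pvLoopA primer w P rest best) := rfl

lemma pvLoopA_eq (primer w : List Char) (l : List Int) (m : Int)
    (hl : ∀ x ∈ l, 0 ≤ x ∧ x + (primer.length : Int) ≤ (w.length : Int)) :
    pvLoopA primer w (primer.length : Int) l (pvRes primer w m)
      = pvRes primer w (pvPick (pvC primer w) m l) := by
  induction l generalizing m with
  | nil => rfl
  | cons y rest ih =>
    obtain ⟨hy0, hyb⟩ := hl y (by simp)
    have hrest : ∀ x ∈ rest, 0 ≤ x ∧ x + (primer.length : Int) ≤ (w.length : Int) :=
      fun x hx => hl x (by simp [hx])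
    rw [pvLoopA_cons, pvPick_cons]
    simp only [pvMetrics_eq' primer w y hy0 hyb]
    by_cases hlt : pvC primer w y < pvC primer w m
    · have hlt1 : pvC primer w y < (pvRes primer w m).1 := hlt
      rw [if_pos hlt1, if_pos hlt]
      by_cases h0 : pvC primer w y = 0
      · rw [if_pos (show (pvC primer w y == 0) = true by simpa using h0)]
        rw [pvPick_stall]
        · rfl
        · intro z hz
          have := pvC_nonneg primer w z
          omega
      · rw [if_neg (show ¬ ((pvC primer w y == 0) = true) by simpa using h0)]
        exact ih y hrest
    · have hlt1 : ¬ pvC primer w y < (pvRes primer w m).1 := hlt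
      rw [if_neg hlt1, if_neg hlt]
      exact ih m hrest

-- B-side: hit counting
lemma pvHits_count (p w : List Char) (num : Int) (s : Nat) (off : Int)
    (h0 : 0 ≤ off) (hoff : off < num)
    (hw : ∀ j, j < p.length → off.toNat + (s + j) < w.length) :
    (((PySem.List.enumerate p (s : Int)).flatMap (fun q =>
        (PySem.List.pyRange 0 num 1).filter (fun o => pvBasesMatch q.2 (PySem.List.pyGetD w (o + q.1) ' ')))).count off)
      = ((List.range p.length).filter
          (fun j => pvBasesMatch (p.getD j 'A') (w.getD (off.toNat + s + j) 'A'))).length := by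
  induction p generalizing s with
  | nil => simp
  | cons a p ih =>
    have hmem : off ∈ PySem.List.pyRange 0 num 1 := by
      rw [PySem.List.mem_pyRange_one]
      omega
    have hnd : (PySem.List.pyRange 0 num 1).Nodup := PySem.List.nodup_pyRange_one 0 num
    have hwlt : off.toNat + s < w.length := by
      have := hw 0 (by simp)
      omega
    have hget : PySem.List.pyGetD w (off + (s : Int)) ' ' = w.getD (off.toNat + s) 'A' := by
      rw [show off + (s : Int) = ((off.toNat + s : Nat) : Int) by omega, PySem.List.pyGetD_natCast]
      rw [List.getD_eq_getElem w ' ' hwlt, List.getD_eq_getElem w 'A' hwlt]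
    have hhead : ((PySem.List.pyRange 0 num 1).filter
          (fun o => pvBasesMatch a (PySem.List.pyGetD w (o + (s : Int)) ' '))).count off
        = if pvBasesMatch a (w.getD (off.toNat + s) 'A') then 1 else 0 := by
      by_cases hc : pvBasesMatch a (PySem.List.pyGetD w (off + (s : Int)) ' ')
      · rw [if_pos (hget ▸ hc),
            List.count_filter (p := fun o => pvBasesMatch a (PySem.List.pyGetD w (o + (s : Int)) ' ')) (a := off) hc,
            List.count_eq_one_of_mem hnd hmem]
      · rw [if_neg (fun hx => hc (by rw [hget]; exact hx)), List.count_eq_zero.mpr]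
        intro hmem2
        exact hc (List.mem_filter.mp hmem2).2
    have hw' : ∀ j, j < p.length → off.toNat + ((s + 1) + j) < w.length := by
      intro j hj
      have := hw (j + 1) (by simp; omega)
      omega
    have ihs := ih (s + 1) hw'
    rw [PySem.List.enumerate_cons, List.flatMap_cons, List.count_append, hhead]
    rw [show ((s : Int) + 1) = (((s + 1 : Nat)) : Int) by push_cast; ring] at *
    rw [ihs]
    have hpred : (List.range p.length).filter
        ((fun j => pvBasesMatch ((a :: p).getD j 'A') (w.getD (off.toNat + s + j) 'A')) ∘ Nat.succ)
        = (List.range p.length).filter (fun j => pvBasesMatch (p.getD j 'A') (w.getD (off.toNat + (s + 1) + j) 'A')) := by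
      apply List.filter_congr
      intro x hx
      simp only [Function.comp, List.getD_cons_succ]
      congr 2
      omega
    simp only [List.length_cons, List.range_succ_eq_map, List.filter_cons, List.getD_cons_zero,
      Nat.add_zero]
    by_cases hm : pvBasesMatch a (w.getD (off.toNat + s) 'A')
    · simp only [hm, if_true, List.length_cons, List.filter_map, hpred, List.length_map]
      omega
    · simp only [hm, Bool.false_eq_true, if_false, List.filter_map, hpred, List.length_map]
      omega

lemma pvArgmax (c g : Int → Int) (N : Int) (l : List Int) (o0 : Int)
    (h : ∀ y ∈ o0 :: l, g y = N - c y) :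
    l.foldl (fun (st : Int × Int) y => if st.2 < g y then (y, g y) else st) (o0, g o0)
      = (pvPick c o0 l, g (pvPick c o0 l)) := by
  induction l generalizing o0 with
  | nil => simp [pvPick]
  | cons y rest ih =>
    have hgo := h o0 (by simp)
    have hgy := h y (by simp [List.mem_cons])
    have hcond : (g o0 < g y) ↔ (c y < c o0) := by rw [hgo, hgy]; omega
    rw [List.foldl_cons, pvPick_cons]
    by_cases hc : c y < c o0
    · rw [if_pos (hcond.mpr hc), if_pos hc]
      exact ih y (fun z hz => h z (by rcases List.mem_cons.mp hz with h1 | h1 <;> simp [h1]))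
    · rw [if_neg (fun hlt => hc (hcond.mp hlt)), if_neg hc]
      exact ih o0 (fun z hz => h z (by rcases List.mem_cons.mp hz with h1 | h1 <;> simp [h1]))

lemma pvPositions_eq (p w : List Char) (off : Int) (h0 : 0 ≤ off)
    (hb : off + (p.length : Int) ≤ (w.length : Int)) :
    ((PySem.List.pyRange 0 (p.length : Int) 1).filter (fun j =>
        !pvBasesMatch (PySem.List.pyGetD p j ' ') (PySem.List.pyGetD w (off + j) ' '))).map (fun j => j + 1)
      = pvPosB p w off := by
  rw [PySem.List.pyRange_zero_natCast, List.filter_map, List.map_map]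
  unfold pvPosB
  have hfil : (List.range p.length).filter
      ((fun j => !pvBasesMatch (PySem.List.pyGetD p j ' ') (PySem.List.pyGetD w (off + j) ' ')) ∘ (fun (k : Nat) => (k : Int)))
      = (List.range p.length).filter (pvMisJ p w off) := by
    apply List.filter_congr
    intro j hj
    rw [List.mem_range] at hj
    have h1 : PySem.List.pyGetD p ((j : Nat) : Int) ' ' = p.getD j 'A' := by
      rw [PySem.List.pyGetD_natCast, List.getD_eq_getElem p ' ' hj, List.getD_eq_getElem p 'A' hj]
    have hlt : off.toNat + j < w.length := by omega
    have h2 : PySem.List.pyGetD w (off + ((j : Nat) : Int)) ' ' = w.getD (off.toNat + j) 'A' := by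
      rw [show off + ((j : Nat) : Int) = ((off.toNat + j : Nat) : Int) by omega, PySem.List.pyGetD_natCast,
          List.getD_eq_getElem w ' ' hlt, List.getD_eq_getElem w 'A' hlt]
    simp only [Function.comp, h1, h2, pvMisJ]
  rw [hfil]
  apply List.map_congr_left
  intro x hx
  simp

theorem pv_main (primer_seq window_seq : String) :
    find_best_alignment primer_seq window_seq = find_best_alignment_alt primer_seq window_seq := by
  simp only [find_best_alignment, find_best_alignment_alt]
  by_cases h0 : primer_seq.toList.length = 0
  · rw [if_pos (show (((primer_seq.toList.length : Int)) == 0) = true by simpa using h0),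
        if_pos (show (((primer_seq.toList.length : Int)) == 0) = true by simpa using h0)]
  · have h0' : ¬ ((((primer_seq.toList.length : Int)) == 0) = true) := by simpa using h0
    rw [if_neg h0', if_neg h0']
    set p := primer_seq.toList with hp
    set w := (if ((window_seq.toList.length : Int) < (p.length : Int)) then
        window_seq.toList ++ PySem.List.pyRepeat ['N'] ((p.length : Int) - (window_seq.toList.length : Int))
      else window_seq.toList) with hwdef
    have hP1 : 1 ≤ p.length := Nat.one_le_iff_ne_zero.mpr h0
    have hwlen : p.length ≤ w.length := by
      rw [hwdef]
      split_ifs with hlt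
      · rw [List.length_append, PySem.List.pyRepeat_singleton, List.length_replicate]
        omega
      · omega
    set num : Int := (w.length : Int) - (p.length : Int) + 1 with hnum
    have hM : (0 : Int) < num := by omega
    set hits := (PySem.List.enumerate p 0).flatMap (fun q =>
        (PySem.List.pyRange 0 num 1).filter (fun off => pvBasesMatch q.2 (PySem.List.pyGetD w (off + q.1) ' '))) with hhits
    set tally := hits.foldl (fun d off => PySem.Dict.insert d off (PySem.Dict.getD d off 0 + 1)) (PySem.Dict.empty : PySem.Dict Int Int) with htally
    have hcount : ∀ off : Int, 0 ≤ off → off < num → PySem.Dict.getD tally off 0 = pvMC p w off := by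
      intro off ho1 ho2
      rw [htally, PySem.Dict.getD_foldl_insert_add_one, PySem.Dict.getD_empty]
      have hw' : ∀ j, j < p.length → off.toNat + (0 + j) < w.length := by
        intro j hj
        omega
      have H := pvHits_count p w num 0 off ho1 ho2 hw'
      simp only [Nat.cast_zero, Nat.add_zero] at H
      rw [hhits, H]
      simp [pvMC]
    have hg : ∀ y ∈ (0 : Int) :: PySem.List.pyRange 1 num 1,
        PySem.Dict.getD tally y 0 = (p.length : Int) - pvC p w y := by
      intro y hy
      have hb : 0 ≤ y ∧ y < num := by
        rcases List.mem_cons.mp hy with h | h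
        · subst h
          exact ⟨le_refl 0, hM⟩
        · rw [PySem.List.mem_pyRange_one] at h
          exact ⟨by omega, h.2⟩
      have hsum := pvC_add_pvMC p w y
      rw [hcount y hb.1 hb.2]
      omega
    set pick := pvPick (pvC p w) 0 (PySem.List.pyRange 1 num 1) with hpickdef
    have hmemp := pvPick_mem (pvC p w) 0 (PySem.List.pyRange 1 num 1)
    have hpb : 0 ≤ pick ∧ pick < num := by
      rw [hpickdef]
      rcases List.mem_cons.mp hmemp with h | h
      · rw [h]
        exact ⟨le_refl 0, hM⟩
      · rw [PySem.List.mem_pyRange_one] at h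
        exact ⟨by omega, h.2⟩
    have hfold' : (PySem.List.pyRange 1 num 1).foldl
        (fun (st : Int × Int) off =>
          if st.2 < PySem.Dict.getD tally off 0 then (off, PySem.Dict.getD tally off 0) else st)
        ((0 : Int), PySem.Dict.getD tally 0 0)
        = (pick, PySem.Dict.getD tally pick 0) :=
      pvArgmax (pvC p w) (fun y => PySem.Dict.getD tally y 0) ((p.length : Int))
        (PySem.List.pyRange 1 num 1) 0 hg
    rw [hfold']
    have hcpick : (p.length : Int) - PySem.Dict.getD tally pick 0 = pvC p w pick := by
      rw [hg pick hmemp]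
      ring
    rw [hcpick, pvPositions_eq p w pick hpb.1 (by omega)]
    -- the B side is now pvRes p w pick; reduce the A side to the same
    rw [show (pvC p w pick, pvPosB p w pick, pick,
          String.ofList (PySem.List.slice w (some pick) (some (pick + (p.length : Int)))))
        = pvRes p w pick from rfl]
    rw [PySem.List.pyRange_one_cons hM, pvLoopA_cons]
    simp only [pvMetrics_eq' p w 0 le_rfl (by omega)]
    have hlt0 : pvC p w 0 < (p.length : Int) + 1 := lt_of_le_of_lt (pvC_le p w 0) (by omega)
    rw [if_pos (show pvC p w 0 < ((p.length : Int) + 1, ([] : List Int), (0 : Int),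
          String.ofList (PySem.List.slice w none (some (p.length : Int)))).1 from hlt0)]
    rw [show ((0 : Int) + 1) = 1 by norm_num]
    have hrest : ∀ x ∈ PySem.List.pyRange 1 num 1,
        0 ≤ x ∧ x + (p.length : Int) ≤ (w.length : Int) := by
      intro x hx
      rw [PySem.List.mem_pyRange_one] at hx
      omega
    by_cases hz : pvC p w 0 = 0
    · rw [if_pos (show (pvC p w 0 == 0) = true by simpa using hz)]
      have hstall : pick = 0 := by
        rw [hpickdef]
        exact pvPick_stall (pvC p w) 0 _ (fun z hz2 => by have := pvC_nonneg p w z; omega)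
      rw [hstall]
      rfl
    · rw [if_neg (show ¬ ((pvC p w 0 == 0) = true) by simpa using hz)]
      rw [show ((pvC p w 0), pvPosB p w 0, (0 : Int),
            String.ofList (PySem.List.slice w (some 0) (some (0 + (p.length : Int)))))
          = pvRes p w 0 from rfl]
      rw [pvLoopA_eq p w _ 0 hrest]

-- ===== VERDICT (by name: the statement is the Claim_ definition above) =====
theorem find_best_alignment_spec : Claim_equal_find_best_alignment := by
  intro p w _
  unfold Spec_find_best_alignment
  exact pv_main p w
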